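-- pv_equiv track=rewrite | github.com/arg-tech/default_segmenter | utility.py | frequent_tuple
-- ===== SOURCE A (Python) =====
-- def frequent_tuple(tuples):
--     count_tuple={}
--     for tup in tuples:
--         length=len(tup[0].split(" "))
--         if length in count_tuple.keys():
--             count_tuple[length]+=1
--         else:
--             count_tuple[length]=1
--     sorted_dct=dict(sorted(count_tuple.items(), reverse=True,key=lambda item: item[1]))
--     return next(iter( sorted_dct.items() ))[0]
-- ===== SOURCE B (Python) =====
-- def frequent_tuple(tuples):
--     count_tuple = {}
--     for tup in tuples:
--         length = len(tup[0].split(" "))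
--         count_tuple[length] = count_tuple.get(length, 0) + 1
--     it = iter(count_tuple.items())
--     best_length, best_count = next(it)
--     for length, count in it:
--         if count > best_count:
--             best_length, best_count = length, count
--     return best_length
-- ===== Notes on version B (the rewrite author's own statement) =====
-- stated objective: simpler
-- what changed: Replaces the sort of the count dict's items (reverse=True by count) followed by taking the first key with a single linear scan keeping the strictly-greatest count (first wins on ties, matching the stable sort).
import Mathlib
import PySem

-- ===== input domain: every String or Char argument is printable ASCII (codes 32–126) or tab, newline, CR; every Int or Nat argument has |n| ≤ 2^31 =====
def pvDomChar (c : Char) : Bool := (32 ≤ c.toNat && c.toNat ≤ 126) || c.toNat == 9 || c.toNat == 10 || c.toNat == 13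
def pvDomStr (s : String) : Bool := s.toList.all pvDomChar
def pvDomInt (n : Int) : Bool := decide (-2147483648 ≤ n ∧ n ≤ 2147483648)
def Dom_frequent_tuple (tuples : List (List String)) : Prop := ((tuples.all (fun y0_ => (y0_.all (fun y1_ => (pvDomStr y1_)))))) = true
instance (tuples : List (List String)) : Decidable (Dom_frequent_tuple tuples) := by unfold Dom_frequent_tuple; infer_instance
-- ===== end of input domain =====

-- B replaces A's sort of the count dict's items (reverse, by count) + take-first-key
-- by a single linear scan keeping the strictly greatest count (first wins ties): simpler, same result.


-- shared subexpression of both Pythons: length = len(tup[0].split(" "))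
-- (tup[0] raises IndexError on an empty tup; Pre_ excludes that, so the default is never read)
def pvWordLen (tup : List String) : Int :=
  (((PySem.Str.split? (PySem.List.pyGetD tup 0 "") " ").getD []).length : Int)

-- ===== PORT A =====
def frequent_tuple (tuples : List (List String)) : Int :=
  let count_tuple : PySem.Dict Int Int :=
    tuples.foldl (fun d tup =>
      if d.contains (pvWordLen tup) then d.insert (pvWordLen tup) (d.getD (pvWordLen tup) 0 + 1)
      else d.insert (pvWordLen tup) 1) PySem.Dict.empty
  let sorted_dct := PySem.List.sorted count_tuple.items (fun item => item.2) true
  -- next(iter(sorted_dct.items()))[0]; StopIteration on an empty dict is excluded by Pre_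
  (sorted_dct.headD (0, 0)).1

-- ===== PORT B =====
def frequent_tuple_alt (tuples : List (List String)) : Int :=
  let count_tuple : PySem.Dict Int Int :=
    tuples.foldl (fun d tup =>
      d.insert (pvWordLen tup) (d.getD (pvWordLen tup) 0 + 1)) PySem.Dict.empty
  match count_tuple.items with
  | [] => 0  -- next(it) raises StopIteration here; excluded by Pre_
  | p :: rest => (rest.foldl (fun best q => if q.2 > best.2 then q else best) p).1

-- ===== PRECONDITION & SPEC =====
-- Pre_ excludes exactly where A raises: the empty list (StopIteration from next(iter(…)))
-- and any inner empty list (IndexError from tup[0]).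
def Pre_frequent_tuple (tuples : List (List String)) : Prop :=
  tuples ≠ [] ∧ ∀ tup ∈ tuples, tup ≠ []
instance (tuples : List (List String)) : Decidable (Pre_frequent_tuple tuples) := by
  unfold Pre_frequent_tuple; infer_instance

def pvWitness_frequent_tuple : List (List String) := [["a b"], ["c"], ["a b"]]

def Spec_frequent_tuple (tuples : List (List String)) (out : Int) : Prop := out = frequent_tuple_alt tuples
instance (tuples : List (List String)) (out : Int) : Decidable (Spec_frequent_tuple tuples out) := by unfold Spec_frequent_tuple; infer_instance

-- ===== CLAIM (what is proved, stated in full; the proofs are below) =====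
def Claim_equal_frequent_tuple : Prop := ∀ (tuples : List (List String)), Dom_frequent_tuple tuples → Pre_frequent_tuple tuples → Spec_frequent_tuple tuples (frequent_tuple tuples)

-- ===== LEMMAS AND PROOFS =====

-- A's guarded counting step equals B's unconditional one (when the key is absent, getD is 0)
lemma pv_fold_eq (l : List (List String)) (d : PySem.Dict Int Int) :
    l.foldl (fun d tup =>
      if d.contains (pvWordLen tup) then d.insert (pvWordLen tup) (d.getD (pvWordLen tup) 0 + 1)
      else d.insert (pvWordLen tup) 1) d
    = l.foldl (fun d tup =>
      d.insert (pvWordLen tup) (d.getD (pvWordLen tup) 0 + 1)) d := by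
  induction l generalizing d with
  | nil => rfl
  | cons a l ih =>
    simp only [List.foldl_cons]
    cases h : d.contains (pvWordLen a) with
    | true => rw [if_pos (by simp)]; exact ih _
    | false =>
      rw [if_neg (by simp), PySem.Dict.getD_of_not_contains d 0 h]
      exact ih _

-- the counting loop never empties the dict
lemma pv_items_ne_nil (l : List (List String)) (d : PySem.Dict Int Int) (hd : d.items ≠ []) :
    (l.foldl (fun d tup =>
      d.insert (pvWordLen tup) (d.getD (pvWordLen tup) 0 + 1)) d).items ≠ [] := by
  induction l generalizing d with
  | nil => exact hd
  | cons a l ih =>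
    simp only [List.foldl_cons]
    apply ih
    rw [PySem.Dict.items_insert]
    split
    · simpa using hd
    · simp

-- head of the reverse-stable insertion-sort fold = the strict-greater linear scan
lemma pv_head_insertBy_fold (l : List (Int × Int)) (b : Int × Int) (t : List (Int × Int)) :
    ((l.foldl (fun acc x => PySem.List.insertBy (fun a c => decide (c.2 < a.2)) x acc) (b :: t)).headD (0, 0))
    = l.foldl (fun best q => if q.2 > best.2 then q else best) b := by
  induction l generalizing b t with
  | nil => rfl
  | cons x l ih =>
    rw [List.foldl_cons, List.foldl_cons]
    by_cases h : b.2 < x.2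
    · have hins : PySem.List.insertBy (fun a c => decide (c.2 < a.2)) x (b :: t) = x :: b :: t := by
        simp [PySem.List.insertBy, h]
      rw [hins, if_pos h]
      exact ih x (b :: t)
    · have hins : PySem.List.insertBy (fun a c => decide (c.2 < a.2)) x (b :: t)
          = b :: PySem.List.insertBy (fun a c => decide (c.2 < a.2)) x t := by
        simp [PySem.List.insertBy, h]
      rw [hins, if_neg h]
      exact ih b _

theorem pv_main (tuples : List (List String)) (hpre : Pre_frequent_tuple tuples) :
    frequent_tuple tuples = frequent_tuple_alt tuples := by
  obtain ⟨hne, -⟩ := hpre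
  unfold frequent_tuple frequent_tuple_alt
  rw [pv_fold_eq]
  have hitems : (tuples.foldl (fun d tup =>
      d.insert (pvWordLen tup) (d.getD (pvWordLen tup) 0 + 1))
      (PySem.Dict.empty : PySem.Dict Int Int)).items ≠ [] := by
    cases tuples with
    | nil => exact absurd rfl hne
    | cons a l =>
      simp only [List.foldl_cons]
      apply pv_items_ne_nil
      rw [PySem.Dict.items_insert]
      simp
  cases hi : (tuples.foldl (fun d tup =>
      d.insert (pvWordLen tup) (d.getD (pvWordLen tup) 0 + 1))
      (PySem.Dict.empty : PySem.Dict Int Int)).items with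
  | nil => exact absurd hi hitems
  | cons p rest =>
    simp only [hi]
    rw [PySem.List.sorted_rev_eq_foldl_insertBy]
    exact congrArg Prod.fst (pv_head_insertBy_fold rest p [])

-- ===== VERDICT (by name: the statement is the Claim_ definition above) =====
theorem frequent_tuple_spec : Claim_equal_frequent_tuple := by
  intro tuples _ hpre
  unfold Spec_frequent_tuple
  exact pv_main tuples hpre
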